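-- pv_equiv track=rewrite | github.com/stewvsshark/algorithms-practice | Greedy Algorithms/seating-arrangements.py | min_overall_awkwardness
-- ===== SOURCE A (Python) =====
-- def min_overall_awkwardness(arr):
--     arr_len = len(arr)
--     arr.sort()
--     max_height_diff = 0
--
--     for i in range(arr_len-2):
--         current_height_diff = arr[i + 2] - arr[i]
--         max_height_diff = max(max_height_diff, current_height_diff)
--
--     return max_height_diff
-- ===== SOURCE B (Python) =====
-- def min_overall_awkwardness(arr):
--     arr.sort()
--     evens = arr[::2]
--     odds = arr[1::2]
--
--     def max_adj(seq):
--         best = 0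
--         for a, b in zip(seq, seq[1:]):
--             best = max(best, b - a)
--         return best
--
--     return max(max_adj(evens), max_adj(odds))
-- ===== Notes on version B (the rewrite author's own statement) =====
-- stated objective: alternative
-- what changed: After the same in-place sort, B splits the array into its even-index and odd-index slices and takes the maximum adjacent gap within each slice, instead of one indexed loop computing arr[i+2]-arr[i]; B, like A, sorts the argument list in place.
import Mathlib
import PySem

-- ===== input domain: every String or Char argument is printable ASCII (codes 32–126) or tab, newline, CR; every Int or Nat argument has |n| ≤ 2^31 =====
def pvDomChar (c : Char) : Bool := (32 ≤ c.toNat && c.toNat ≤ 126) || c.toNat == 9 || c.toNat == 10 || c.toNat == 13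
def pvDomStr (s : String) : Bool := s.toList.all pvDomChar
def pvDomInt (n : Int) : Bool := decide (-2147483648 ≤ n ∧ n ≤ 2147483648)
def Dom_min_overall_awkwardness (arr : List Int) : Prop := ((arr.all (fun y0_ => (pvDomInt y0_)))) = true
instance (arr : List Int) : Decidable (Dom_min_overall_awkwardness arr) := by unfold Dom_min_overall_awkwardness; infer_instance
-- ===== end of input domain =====

-- B replaces A's indexed loop over arr[i+2]-arr[i] by the even-/odd-index slices of the
-- sorted array and the max adjacent gap within each (objective: alternative decomposition).
-- Both A and B sort the argument list in place; the equivalence proved is about the return value.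

-- ===== PORT A =====
def min_overall_awkwardness (arr : List Int) : Int :=
  let arr_len : Int := arr.length
  let arr := PySem.List.sorted arr (fun x => x) false
  (PySem.List.pyRange 0 (arr_len - 2) 1).foldl
    (fun max_height_diff i =>
      let current_height_diff := PySem.List.pyGetD arr (i + 2) 0 - PySem.List.pyGetD arr i 0
      max max_height_diff current_height_diff) 0

-- ===== PORT B =====
-- max_adj: best = 0; for a, b in zip(seq, seq[1:]): best = max(best, b - a)
def pvMaxAdj (seq : List Int) : Int :=
  (seq.zip seq.tail).foldl (fun best p => max best (p.2 - p.1)) 0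

def min_overall_awkwardness_alt (arr : List Int) : Int :=
  let arr := PySem.List.sorted arr (fun x => x) false
  let evens := (PySem.List.slice? arr none none 2).getD []
  let odds := (PySem.List.slice? arr (some 1) none 2).getD []
  max (pvMaxAdj evens) (pvMaxAdj odds)

-- ===== PRECONDITION & SPEC =====
def Spec_min_overall_awkwardness (arr : List Int) (out : Int) : Prop := out = min_overall_awkwardness_alt arr
instance (arr : List Int) (out : Int) : Decidable (Spec_min_overall_awkwardness arr out) := by unfold Spec_min_overall_awkwardness; infer_instance

-- ===== CLAIM (what is proved, stated in full; the proofs are below) =====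
def Claim_equal_min_overall_awkwardness : Prop := ∀ (arr : List Int), Dom_min_overall_awkwardness arr → Spec_min_overall_awkwardness arr (min_overall_awkwardness arr)

-- ===== LEMMAS AND PROOFS =====

-- every second element of a list, starting with the first (what xs[::2] yields)
def pvEvens {α : Type} : List α → List α
  | [] => []
  | [a] => [a]
  | a :: _ :: t => a :: pvEvens t

-- the two-apart differences A's loop ranges over
def pvDiffs2 : List Int → List Int
  | a :: b :: c :: t => (c - a) :: pvDiffs2 (b :: c :: t)
  | _ => []

-- the adjacent differences pvMaxAdj maxes over
def pvAdjDiffs : List Int → List Int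
  | a :: b :: t => (b - a) :: pvAdjDiffs (b :: t)
  | _ => []

def pvSup (l : List Int) : Int := l.foldl max 0

theorem pvFoldlMax_pull (l : List Int) (c x : Int) :
    l.foldl max (max c x) = max x (l.foldl max c) := by
  induction l generalizing c with
  | nil => simp [max_comm]
  | cons y t ih =>
    simp only [List.foldl_cons]
    rw [max_right_comm c x y, ih]

theorem pvSup_cons (x : Int) (l : List Int) : pvSup (x :: l) = max x (pvSup l) := by
  simp only [pvSup, List.foldl_cons]
  exact pvFoldlMax_pull l 0 x

-- step-2 slicing from index 0 produces pvEvens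
theorem pvFilterMap_evens {α : Type} (xs : List α) :
    List.filterMap (fun k => xs[2 * k]?) (List.range ((xs.length + 1) / 2)) = pvEvens xs := by
  induction xs using pvEvens.induct with
  | case1 => simp [pvEvens]
  | case2 a => simp [pvEvens]
  | case3 a b t ih =>
    have hlen : ((a :: b :: t).length + 1) / 2 = (t.length + 1) / 2 + 1 := by
      simp only [List.length_cons]; omega
    rw [hlen, List.range_succ_eq_map, List.filterMap_cons, List.filterMap_map]
    simp only [Nat.mul_zero, List.getElem?_cons_zero]
    rw [pvEvens]
    congr 1

theorem pvSlice2 (xs : List Int) :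
    PySem.List.slice? xs none none 2 = some (pvEvens xs) := by
  rw [← pvFilterMap_evens xs]
  simp only [PySem.List.slice?, PySem.List.sliceIndices]
  norm_num
  have hc : (if 0 < xs.length then (((xs.length : Int) + 2 - 1) / 2).toNat else 0)
      = (xs.length + 1) / 2 := by split <;> omega
  rw [hc]
  exact List.filterMap_congr (fun k hk => by congr 1)

theorem pvSlice2_odd (xs : List Int) :
    PySem.List.slice? xs (some 1) none 2 = some (pvEvens xs.tail) := by
  rw [← pvFilterMap_evens xs.tail]
  simp only [PySem.List.slice?, PySem.List.sliceIndices]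
  norm_num
  have hc : (if 1 < xs.length then ((((xs.length : Int)) - min 1 ((xs.length : Int)) + 2 - 1) / 2).toNat else 0)
      = (xs.length - 1 + 1) / 2 := by split <;> omega
  rw [hc]
  apply List.filterMap_congr
  intro k hk
  simp only [List.mem_range] at hk
  have h1 : (1 : Int) ≤ (xs.length : Int) := by omega
  rw [min_eq_left h1]
  congr 1
  omega

-- zip-with-tail mapped to differences is pvAdjDiffs
theorem pvZipMap (seq : List Int) :
    (seq.zip seq.tail).map (fun p : Int × Int => p.2 - p.1) = pvAdjDiffs seq := by
  induction seq using pvAdjDiffs.induct with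
  | case1 a b t ih =>
    simp only [List.tail_cons, List.zip_cons_cons, List.map_cons]
    rw [pvAdjDiffs]
    simp only [List.tail_cons] at ih
    rw [ih]
  | case2 s h =>
    match s, h with
    | [], _ => rfl
    | [a], _ => rfl
    | a :: b :: t, h => exact (h a b t rfl).elim

theorem pvMaxAdj_eq (seq : List Int) : pvMaxAdj seq = pvSup (pvAdjDiffs seq) := by
  rw [pvMaxAdj, pvSup, ← pvZipMap, List.foldl_map]

-- A's indexed differences are pvDiffs2
theorem pvMapRange (s : List Int) :
    (List.range (s.length - 2)).map (fun k => s.getD (k + 2) 0 - s.getD k 0) = pvDiffs2 s := by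
  induction s using pvDiffs2.induct with
  | case1 a b c t ih =>
    have hlen : (a :: b :: c :: t).length - 2 = ((b :: c :: t).length - 2) + 1 := by
      simp only [List.length_cons]; omega
    rw [hlen, List.range_succ_eq_map, List.map_cons, List.map_map]
    rw [pvDiffs2]
    congr 1
  | case2 s h =>
    match s, h with
    | [], _ => rfl
    | [a], _ => rfl
    | [a, b], _ => rfl
    | a :: b :: c :: t, h => exact (h a b c t rfl).elim

-- the two-apart diffs are the adjacent diffs of the two interleaved lanes
theorem pvInterleave (s : List Int) :
    pvSup (pvDiffs2 s) = max (pvSup (pvAdjDiffs (pvEvens s))) (pvSup (pvAdjDiffs (pvEvens s.tail))) := by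
  induction s using pvDiffs2.induct with
  | case1 a b c t ih =>
    have he : pvEvens (a :: b :: c :: t) = a :: pvEvens (c :: t) := by
      cases t with
      | nil => rfl
      | cons x t' => rfl
    have he2 : pvAdjDiffs (a :: pvEvens (c :: t)) = (c - a) :: pvAdjDiffs (pvEvens (c :: t)) := by
      cases t with
      | nil => rfl
      | cons x t' => rfl
    rw [pvDiffs2, pvSup_cons, ih, he, he2, pvSup_cons]
    simp only [List.tail_cons]
    omega
  | case2 s h =>
    match s, h with
    | [], _ => rfl
    | [a], _ => rfl
    | [a, b], _ => rfl
    | a :: b :: c :: t, h => exact (h a b c t rfl).elim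

-- ===== VERDICT (by name: the statement is the Claim_ definition above) =====
theorem min_overall_awkwardness_spec : Claim_equal_min_overall_awkwardness := by
  intro arr _
  unfold Spec_min_overall_awkwardness min_overall_awkwardness min_overall_awkwardness_alt
  simp only [pvSlice2, pvSlice2_odd, Option.getD_some, pvMaxAdj_eq]
  rw [← pvInterleave]
  rw [PySem.List.pyRange_one]
  rw [List.foldl_map]
  set s := PySem.List.sorted arr (fun x => x) false with hs
  have hlen : s.length = arr.length := PySem.List.length_sorted arr _ false
  have hn : ((arr.length : Int) - 2 - 0).toNat = s.length - 2 := by omega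
  rw [hn]
  have hfun : (fun (x : Int) (y : Nat) =>
        max x (PySem.List.pyGetD s (0 + (y : Int) + 2) 0 - PySem.List.pyGetD s (0 + (y : Int)) 0))
      = (fun (x : Int) (y : Nat) => max x (s.getD (y + 2) 0 - s.getD y 0)) := by
    funext x y
    have h2 : (0 + (y : Int) + 2) = ((y + 2 : Nat) : Int) := by push_cast; ring
    have h0 : (0 + (y : Int)) = ((y : Nat) : Int) := by ring
    rw [h2, h0, PySem.List.pyGetD_natCast, PySem.List.pyGetD_natCast]
  rw [hfun, ← List.foldl_map, pvMapRange]
  rfl
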